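-- pv_equiv track=rewrite | github.com/AshTiwari/Python-Guide | Algorithms/sortedArrays.py | intersectionK
-- ===== SOURCE A (Python) =====
-- def Intersection(sorted_array_1,sorted_array_2):
-- 	i = 0				# tracks array 1
-- 	j = 0				# tracks array 2
-- 	array = []
-- 	while(i < len(sorted_array_1) and j < len(sorted_array_2)):
-- 		if sorted_array_1[i] == sorted_array_2[j]:
-- 			if len(array) == 0 or sorted_array_1[i] != array[-1]:
-- 				array.append(sorted_array_1[i])
-- 			i = i+1
-- 			j = j + 1
--
-- 		elif sorted_array_1[i] < sorted_array_2[j]: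
-- 			i = i+1
-- 		elif sorted_array_1[i] > sorted_array_2[j]:
-- 			j = j + 1
-- 	return array
--
-- def intersectionK(arrays):
-- 	n = len(arrays)
-- 	if n <= 1:
-- 		return arrays[0]
-- 	elif n == 2:
-- 		return Intersection(arrays[0],arrays[1])
-- 	else:
-- 		mid = n//2
-- 		leftSubArray = intersectionK(arrays[:mid])
-- 		rightSubArray = intersectionK(arrays[mid:])
-- 		return Intersection(leftSubArray, rightSubArray)
-- ===== SOURCE B (Python) =====
-- def intersectionK(arrays):
--     result = arrays[0]
--     for nxt in arrays[1:]:
--         matched = []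
--         i = 0
--         j = 0
--         while i < len(result) and j < len(nxt):
--             if result[i] < nxt[j]:
--                 i += 1
--             elif nxt[j] < result[i]:
--                 j += 1
--             else:
--                 matched.append(result[i])
--                 i += 1
--                 j += 1
--         deduped = []
--         prev = None
--         for v in matched:
--             if v != prev:
--                 deduped.append(v)
--                 prev = v
--         result = deduped
--     return result
-- ===== Notes on version B (the rewrite author's own statement) =====
-- stated objective: faster
-- what changed: Replaces the divide-and-conquer recursion (split at n//2, recurse, arrays[:mid]/arrays[mid:] slice copies) by a single left-to-right fold whose pairwise step is itself decomposed differently: first collect the raw two-pointer match stream, then remove adjacent duplicates in a separate pass with a prev sentinel, instead of A's dedup-inside-the-merge-loop against array[-1].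
-- outside the precondition, e.g. on intersectionK([[0, 1, 0, 0], [1, 1, 0], [0, 1, 1, 0]]): A returns [1, 0], B returns [1]
import Mathlib
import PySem

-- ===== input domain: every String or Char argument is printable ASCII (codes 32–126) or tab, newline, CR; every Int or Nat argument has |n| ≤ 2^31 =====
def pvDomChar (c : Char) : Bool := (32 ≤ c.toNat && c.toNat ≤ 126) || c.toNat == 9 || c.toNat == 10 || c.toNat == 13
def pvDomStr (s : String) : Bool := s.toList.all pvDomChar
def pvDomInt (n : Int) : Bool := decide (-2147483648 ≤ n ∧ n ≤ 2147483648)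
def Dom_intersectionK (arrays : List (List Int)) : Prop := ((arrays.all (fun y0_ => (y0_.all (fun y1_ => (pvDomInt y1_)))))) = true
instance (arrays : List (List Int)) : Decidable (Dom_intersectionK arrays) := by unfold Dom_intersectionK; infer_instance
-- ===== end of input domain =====

-- B replaces A's divide-and-conquer recursion by a single left fold, and decomposes the
-- pairwise step into a raw two-pointer match stream followed by a separate
-- adjacent-dedup pass with a prev sentinel (A dedups inside the merge loop).

-- ===== PORT A =====
-- The while loop of Intersection, with the index pair (i, j) represented by the
-- pair of remaining suffixes and `array` as the accumulator `acc` (append at the end).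
-- `len(array) == 0 or x != array[-1]` is ported as `acc.getLast? ≠ some x` (exact:
-- getLast? is none exactly when the list is empty, else some of array[-1]).
def interGo : List Int → List Int → List Int → List Int
  | x :: a, y :: b, acc =>
    if x = y then
      interGo a b (if acc.getLast? = some x then acc else acc ++ [x])
    else if x < y then
      interGo a (y :: b) acc
    else
      interGo (x :: a) b acc
  | _, _, acc => acc
  termination_by a b _ => a.length + b.length

def Intersection (sorted_array_1 sorted_array_2 : List Int) : List Int :=
  interGo sorted_array_1 sorted_array_2 []

def intersectionK (arrays : List (List Int)) : List Int :=
  let n := arrays.length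
  if _h1 : n ≤ 1 then
    arrays.headD []          -- arrays[0]; on [] Python raises IndexError (excluded by Pre_)
  else if _h2 : n = 2 then
    Intersection (arrays.headD []) ((arrays.drop 1).headD [])   -- arrays[0], arrays[1]
  else
    let mid := n / 2
    Intersection (intersectionK (arrays.take mid)) (intersectionK (arrays.drop mid))
  termination_by arrays.length
  decreasing_by
    · simp; omega
    · simp; omega

-- ===== PORT B =====
-- the inner while loop of Source B: raw match stream of the two-pointer walk, duplicates kept
-- (indices i, j represented as the remaining suffixes)
def rawGo : List Int → List Int → List Int
  | x :: a, y :: b =>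
    if x < y then rawGo a (y :: b)
    else if y < x then rawGo (x :: a) b
    else x :: rawGo a b
  | _, _ => []
  termination_by a b => a.length + b.length

-- one iteration of Source B's second pass: state = (deduped, prev); Python's None → Option
def dedupStep (st : List Int × Option Int) (v : Int) : List Int × Option Int :=
  if some v ≠ st.2 then (st.1 ++ [v], some v) else st

-- body of Source B's outer for loop: matched stream, then the dedup pass
def altStep (result nxt : List Int) : List Int :=
  ((rawGo result nxt).foldl dedupStep ([], none)).1

def intersectionK_alt (arrays : List (List Int)) : List Int :=
  match arrays with
  | [] => []                 -- arrays[0] raises IndexError here (excluded by Pre_)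
  | a :: rest => rest.foldl (fun result nxt => altStep result nxt) a

-- ===== PRECONDITION & SPEC =====
-- Pre_ excludes the empty list (A raises IndexError on arrays[0]) and, when there
-- are at least 3 arrays, requires each array to be sorted nondecreasing — the
-- function's natural domain (the source file is sortedArrays.py): on unsorted
-- arrays the value of A's divide-and-conquer tree is an accident of its split
-- order and differs from other associations of the pairwise intersections.
-- (With at most 2 arrays A and B coincide on every input, so nothing is excluded.)
def Pre_intersectionK (arrays : List (List Int)) : Prop :=
  arrays ≠ [] ∧ (3 ≤ arrays.length → ∀ a ∈ arrays, a.Pairwise (· ≤ ·))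
instance (arrays : List (List Int)) : Decidable (Pre_intersectionK arrays) := by
  unfold Pre_intersectionK; infer_instance

def pvWitness_intersectionK : List (List Int) := [[1, 2, 2, 3], [2, 3, 5], [0, 2, 3]]

def Spec_intersectionK (arrays : List (List Int)) (out : List Int) : Prop := out = intersectionK_alt arrays
instance (arrays : List (List Int)) (out : List Int) : Decidable (Spec_intersectionK arrays out) := by unfold Spec_intersectionK; infer_instance

-- ===== CLAIM (what is proved, stated in full; the proofs are below) =====
def Claim_equal_intersectionK : Prop := ∀ (arrays : List (List Int)), Dom_intersectionK arrays → Pre_intersectionK arrays → Spec_intersectionK arrays (intersectionK arrays)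

-- ===== LEMMAS AND PROOFS =====

-- B's step equals A's Intersection loop on ALL inputs: dedup-inside-the-merge with
-- accumulator acc = raw stream followed by the dedup fold started at (acc, acc[-1])
lemma step_eq : ∀ (a b acc : List Int),
    interGo a b acc = ((rawGo a b).foldl dedupStep (acc, acc.getLast?)).1 := by
  intro a b acc
  fun_induction interGo a b acc with
  | case1 a y b acc ih =>
    have hraw : rawGo (y :: a) (y :: b) = y :: rawGo a b := by
      simp [rawGo]
    rw [hraw, List.foldl_cons]
    by_cases hL : acc.getLast? = some y
    · have hstep : dedupStep (acc, acc.getLast?) y = (acc, acc.getLast?) := by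
        simp [dedupStep, hL]
      rw [hstep]
      simpa [hL] using ih
    · have hstep : dedupStep (acc, acc.getLast?) y = (acc ++ [y], some y) := by
        simp [dedupStep]
        intro h; exact absurd h.symm hL
      rw [hstep]
      have hlast : (acc ++ [y]).getLast? = some y := by simp
      simpa [hL, hlast] using ih
  | case2 x a y b acc hxy hlt ih =>
    have hraw : rawGo (x :: a) (y :: b) = rawGo a (y :: b) := by
      simp [rawGo, hlt]
    rw [hraw]; exact ih
  | case3 x a y b acc hxy hlt ih =>
    have hylt : y < x := by omega
    have hnlt : ¬ x < y := by omega
    have hraw : rawGo (x :: a) (y :: b) = rawGo (x :: a) b := by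
      simp [rawGo, hnlt, hylt]
    rw [hraw]; exact ih
  | case4 a b acc h =>
    cases a with
    | nil => simp [rawGo]
    | cons x a' =>
      cases b with
      | nil => simp [rawGo]
      | cons y b' => exact absurd (h x a' y b' rfl rfl) (fun f => f)

lemma altStep_eq_Intersection (a b : List Int) : altStep a b = Intersection a b := by
  rw [Intersection, step_eq]
  rfl

-- every element of a (· ≤ ·)-pairwise list is ≤ its last element
lemma le_getLast?_of_pairwise : ∀ (l : List Int), l.Pairwise (· ≤ ·) →
    ∀ z ∈ l, ∃ w, l.getLast? = some w ∧ z ≤ w := by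
  intro l
  induction l with
  | nil => intro _ z hz; simp at hz
  | cons a t ih =>
    intro hp z hz
    rcases List.pairwise_cons.mp hp with ⟨hle, ht⟩
    cases t with
    | nil => simp at hz; simp [hz]
    | cons b t' =>
      rcases List.mem_cons.mp hz with rfl | hz'
      · rcases ih ht b (by simp) with ⟨w, hw, hbw⟩
        exact ⟨w, by simpa using hw, le_trans (hle b (by simp)) hbw⟩
      · rcases ih ht z hz' with ⟨w, hw, hzw⟩
        exact ⟨w, by simpa using hw, hzw⟩

lemma getLast?_mem' : ∀ (l : List Int) (w : Int), l.getLast? = some w → w ∈ l := by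
  intro l
  induction l with
  | nil => intro w h; simp at h
  | cons a t ih =>
    intro w h
    cases t with
    | nil => simp at h; simp [h]
    | cons b t' =>
      simp only [List.getLast?_cons_cons] at h
      exact List.mem_cons_of_mem a (ih w h)

lemma interGo_char : ∀ (a b acc : List Int),
    a.Pairwise (· ≤ ·) → b.Pairwise (· ≤ ·) → acc.Pairwise (· < ·) →
    (∀ z ∈ acc, ∀ u ∈ a, z ≤ u) → (∀ z ∈ acc, ∀ u ∈ b, z ≤ u) →
    (interGo a b acc).Pairwise (· < ·) ∧
    (∀ x, x ∈ interGo a b acc ↔ x ∈ acc ∨ (x ∈ a ∧ x ∈ b)) := by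
  intro a b acc
  fun_induction interGo a b acc with
  | case1 a y b acc ih =>
    intro ha hb hacc hba hbb
    rcases List.pairwise_cons.mp ha with ⟨hya, ha'⟩
    rcases List.pairwise_cons.mp hb with ⟨hyb, hb'⟩
    by_cases hL : acc.getLast? = some y
    · -- y equals the last of acc: skip, recurse on tails with same acc
      have hrw : (if h : acc.getLast? = some y then acc else acc ++ [y]) = acc := by
        simp [hL]
      have hrw2 : (if acc.getLast? = some y then acc else acc ++ [y]) = acc := by
        simp [hL]
      rw [hrw] at ih
      rw [hrw2]
      have hyacc : y ∈ acc := getLast?_mem' acc y hL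
      have hba' : ∀ z ∈ acc, ∀ u ∈ a, z ≤ u := fun z hz u hu =>
        le_trans (hba z hz y (by simp)) (hya u hu)
      have hbb' : ∀ z ∈ acc, ∀ u ∈ b, z ≤ u := fun z hz u hu =>
        le_trans (hbb z hz y (by simp)) (hyb u hu)
      obtain ⟨hp, hm⟩ := ih ha' hb' hacc hba' hbb'
      refine ⟨hp, fun x => ?_⟩
      rw [hm x]
      constructor
      · rintro (h | ⟨h1, h2⟩)
        · exact Or.inl h
        · exact Or.inr ⟨List.mem_cons_of_mem _ h1, List.mem_cons_of_mem _ h2⟩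
      · rintro (h | ⟨h1, h2⟩)
        · exact Or.inl h
        · by_cases hx : x = y
          · exact Or.inl (hx ▸ hyacc)
          · exact Or.inr ⟨(List.mem_cons.mp h1).resolve_left hx,
              (List.mem_cons.mp h2).resolve_left hx⟩
    · -- append y to acc
      have hrw : (if h : acc.getLast? = some y then acc else acc ++ [y]) = acc ++ [y] := by
        simp [hL]
      have hrw2 : (if acc.getLast? = some y then acc else acc ++ [y]) = acc ++ [y] := by
        simp [hL]
      rw [hrw] at ih
      rw [hrw2]
      have hltacc : ∀ z ∈ acc, z < y := by
        intro z hz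
        have hzy : z ≤ y := hba z hz y (by simp)
        rcases lt_or_eq_of_le hzy with h | heq
        · exact h
        · exfalso
          obtain ⟨w, hw, hzw⟩ := le_getLast?_of_pairwise acc
            (hacc.imp (fun h => le_of_lt h)) z hz
          have hwy : w ≤ y := hba w (getLast?_mem' acc w hw) y (by simp)
          have hwz : w = y := le_antisymm hwy (heq ▸ hzw)
          exact hL (hwz ▸ hw)
      have hacc' : (acc ++ [y]).Pairwise (· < ·) := by
        rw [List.pairwise_append]
        exact ⟨hacc, by simp, by simpa using hltacc⟩
      have hba' : ∀ z ∈ acc ++ [y], ∀ u ∈ a, z ≤ u := by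
        intro z hz u hu
        rcases List.mem_append.mp hz with hz | hz
        · exact le_trans (hba z hz y (by simp)) (hya u hu)
        · simp at hz; exact hz ▸ hya u hu
      have hbb' : ∀ z ∈ acc ++ [y], ∀ u ∈ b, z ≤ u := by
        intro z hz u hu
        rcases List.mem_append.mp hz with hz | hz
        · exact le_trans (hbb z hz y (by simp)) (hyb u hu)
        · simp at hz; exact hz ▸ hyb u hu
      obtain ⟨hp, hm⟩ := ih ha' hb' hacc' hba' hbb'
      refine ⟨hp, fun x => ?_⟩
      rw [hm x]
      constructor
      · rintro (h | ⟨h1, h2⟩)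
        · rcases List.mem_append.mp h with h | h
          · exact Or.inl h
          · simp at h; exact Or.inr ⟨by simp [h], by simp [h]⟩
        · exact Or.inr ⟨List.mem_cons_of_mem _ h1, List.mem_cons_of_mem _ h2⟩
      · rintro (h | ⟨h1, h2⟩)
        · exact Or.inl (List.mem_append.mpr (Or.inl h))
        · by_cases hx : x = y
          · exact Or.inl (by simp [hx])
          · exact Or.inr ⟨(List.mem_cons.mp h1).resolve_left hx,
              (List.mem_cons.mp h2).resolve_left hx⟩
  | case2 x a y b acc hxy hlt ih =>
    intro ha hb hacc hba hbb
    rcases List.pairwise_cons.mp ha with ⟨hxa, ha'⟩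
    rcases List.pairwise_cons.mp hb with ⟨hyb, hb'⟩
    have hba' : ∀ z ∈ acc, ∀ u ∈ a, z ≤ u := fun z hz u hu =>
      le_trans (hba z hz x (by simp)) (hxa u hu)
    obtain ⟨hp, hm⟩ := ih ha' hb hacc hba' hbb
    refine ⟨hp, fun x₀ => ?_⟩
    rw [hm x₀]
    constructor
    · rintro (h | ⟨h1, h2⟩)
      · exact Or.inl h
      · exact Or.inr ⟨List.mem_cons_of_mem _ h1, h2⟩
    · rintro (h | ⟨h1, h2⟩)
      · exact Or.inl h
      · rcases List.mem_cons.mp h1 with rfl | h1'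
        · -- x₀ = x cannot be in y :: b since x < y ≤ every element of b
          exfalso
          rcases List.mem_cons.mp h2 with rfl | h2'
          · exact hxy rfl
          · exact absurd (lt_of_lt_of_le hlt (hyb _ h2')) (lt_irrefl _)
        · exact Or.inr ⟨h1', h2⟩
  | case3 x a y b acc hxy hlt ih =>
    intro ha hb hacc hba hbb
    rcases List.pairwise_cons.mp ha with ⟨hxa, ha'⟩
    rcases List.pairwise_cons.mp hb with ⟨hyb, hb'⟩
    have hylt : y < x := by omega
    have hbb' : ∀ z ∈ acc, ∀ u ∈ b, z ≤ u := fun z hz u hu =>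
      le_trans (hbb z hz y (by simp)) (hyb u hu)
    obtain ⟨hp, hm⟩ := ih ha hb' hacc hba hbb'
    refine ⟨hp, fun x₀ => ?_⟩
    rw [hm x₀]
    constructor
    · rintro (h | ⟨h1, h2⟩)
      · exact Or.inl h
      · exact Or.inr ⟨h1, List.mem_cons_of_mem _ h2⟩
    · rintro (h | ⟨h1, h2⟩)
      · exact Or.inl h
      · rcases List.mem_cons.mp h2 with rfl | h2'
        · exfalso
          rcases List.mem_cons.mp h1 with rfl | h1'
          · exact hxy rfl
          · exact absurd (lt_of_lt_of_le hylt (hxa _ h1')) (lt_irrefl _)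
        · exact Or.inr ⟨h1, h2'⟩
  | case4 a b acc h =>
    intro _ _ hacc _ _
    cases a with
    | nil =>
      refine ⟨by simpa [interGo] using hacc, fun x => by simp⟩
    | cons x a' =>
      cases b with
      | nil =>
        refine ⟨by simpa [interGo] using hacc, fun x₀ => by simp⟩
      | cons y b' => exact absurd (h x a' y b' rfl rfl) (fun f => f)

lemma Intersection_char (a b : List Int) (ha : a.Pairwise (· ≤ ·)) (hb : b.Pairwise (· ≤ ·)) :
    (Intersection a b).Pairwise (· < ·) ∧
    (∀ x, x ∈ Intersection a b ↔ x ∈ a ∧ x ∈ b) := by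
  have h := interGo_char a b [] ha hb (by simp) (by simp) (by simp)
  simpa [Intersection] using h

lemma intersectionK_char : ∀ (arrays : List (List Int)), arrays ≠ [] →
    (∀ a ∈ arrays, a.Pairwise (· ≤ ·)) →
    (intersectionK arrays).Pairwise (· ≤ ·) ∧
    (2 ≤ arrays.length → (intersectionK arrays).Pairwise (· < ·)) ∧
    (∀ x, x ∈ intersectionK arrays ↔ ∀ a ∈ arrays, x ∈ a) := by
  intro arrays
  fun_induction intersectionK arrays with
  | case1 arrays n h1 =>
    intro hne hs
    rcases arrays with _ | ⟨a, t⟩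
    · exact absurd rfl hne
    · rcases t with _ | ⟨b, t'⟩
      · refine ⟨hs a (by simp), by simp, fun x => by simp⟩
      · exfalso; revert h1; show (a :: b :: t').length ≤ 1 → False; simp
  | case2 arrays n h1 h2 =>
    intro hne hs
    rcases arrays with _ | ⟨a, t⟩
    · exact absurd rfl hne
    · rcases t with _ | ⟨b, t'⟩
      · exfalso; revert h2; show [a].length = 2 → False; simp
      · rcases t' with _ | ⟨c, t''⟩
        · obtain ⟨hp, hm⟩ := Intersection_char a b (hs a (by simp)) (hs b (by simp))
          exact ⟨hp.imp (fun h => le_of_lt h), fun _ => hp, fun x => by simpa using hm x⟩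
        · exfalso; revert h2; show (a :: b :: c :: t'').length = 2 → False; simp
  | case3 arrays n h1 h2 mid ih1 ih2 =>
    intro hne hs
    have hmid1 : 1 ≤ mid := by simp [mid, n]; omega
    have hmidn : mid < n := by simp [mid, n]; omega
    have htne : arrays.take mid ≠ [] := by
      apply List.ne_nil_of_length_pos
      simp [List.length_take]
      constructor <;> omega
    have hdne : arrays.drop mid ≠ [] := by
      apply List.ne_nil_of_length_pos
      simp [List.length_drop]
      omega
    obtain ⟨hL, _, hmL⟩ := ih1 htne (fun a ha => hs a (List.take_subset _ _ ha))
    obtain ⟨hR, _, hmR⟩ := ih2 hdne (fun a ha => hs a (List.drop_subset _ _ ha))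
    obtain ⟨hp, hm⟩ := Intersection_char _ _ hL hR
    refine ⟨hp.imp (fun h => le_of_lt h), fun _ => hp, fun x => ?_⟩
    rw [hm x, hmL x, hmR x]
    constructor
    · intro ⟨hA, hB⟩ a ha
      rcases List.mem_append.mp (by rwa [List.take_append_drop mid arrays]) with h | h
      · exact hA a h
      · exact hB a h
    · intro h
      exact ⟨fun a ha => h a (List.take_subset _ _ ha),
             fun a ha => h a (List.drop_subset _ _ ha)⟩

lemma foldl_char : ∀ (rest : List (List Int)) (a : List Int),
    a.Pairwise (· ≤ ·) → (∀ b ∈ rest, b.Pairwise (· ≤ ·)) →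
    (rest.foldl (fun result x => Intersection result x) a).Pairwise (· ≤ ·) ∧
    (rest ≠ [] → (rest.foldl (fun result x => Intersection result x) a).Pairwise (· < ·)) ∧
    (∀ x, x ∈ rest.foldl (fun result x => Intersection result x) a ↔ x ∈ a ∧ ∀ b ∈ rest, x ∈ b) := by
  intro rest
  induction rest with
  | nil => intro a ha _; exact ⟨ha, by simp, fun x => by simp⟩
  | cons b rest' ih =>
    intro a ha hs
    obtain ⟨hpI, hmI⟩ := Intersection_char a b ha (hs b (by simp))
    obtain ⟨h1, h2, h3⟩ := ih (Intersection a b) (hpI.imp (fun h => le_of_lt h))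
      (fun c hc => hs c (List.mem_cons_of_mem _ hc))
    refine ⟨by simpa using h1, fun _ => ?_, fun x => ?_⟩
    · cases rest' with
      | nil => simpa using hpI
      | cons c t => simpa using h2 (by simp)
    · simp only [List.foldl_cons]
      rw [h3 x]
      rw [hmI x]
      constructor
      · intro ⟨⟨hxa, hxb⟩, hrest⟩
        exact ⟨hxa, fun c hc => by
          rcases List.mem_cons.mp hc with rfl | hc'
          · exact hxb
          · exact hrest c hc'⟩
      · intro ⟨hxa, hall⟩
        exact ⟨⟨hxa, hall b (by simp)⟩, fun c hc => hall c (List.mem_cons_of_mem _ hc)⟩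

-- B's fold, rewritten through altStep_eq_Intersection
lemma alt_eq_foldl_Intersection (a : List Int) (rest : List (List Int)) :
    intersectionK_alt (a :: rest) = rest.foldl (fun result x => Intersection result x) a := by
  show rest.foldl (fun result nxt => altStep result nxt) a = _
  have : (fun (result nxt : List Int) => altStep result nxt) =
      (fun (result nxt : List Int) => Intersection result nxt) := by
    funext r x; exact altStep_eq_Intersection r x
  rw [this]

lemma strict_eq : ∀ (l₁ l₂ : List Int), l₁.Pairwise (· < ·) → l₂.Pairwise (· < ·) →
    (∀ x, x ∈ l₁ ↔ x ∈ l₂) → l₁ = l₂ := by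
  intro l₁
  induction l₁ with
  | nil =>
    intro l₂ _ _ hm
    cases l₂ with
    | nil => rfl
    | cons b t => exact absurd ((hm b).mpr (by simp)) (by simp)
  | cons a t ih =>
    intro l₂ hp1 hp2 hm
    cases l₂ with
    | nil => exact absurd ((hm a).mp (by simp)) (by simp)
    | cons b t₂ =>
      rcases List.pairwise_cons.mp hp1 with ⟨hat, ht⟩
      rcases List.pairwise_cons.mp hp2 with ⟨hbt, ht₂⟩
      have hab : a = b := by
        rcases List.mem_cons.mp ((hm a).mp (by simp)) with h | h
        · exact h
        · rcases List.mem_cons.mp ((hm b).mpr (by simp)) with h' | h'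
          · exact h'.symm
          · have := hat b h'
            have := hbt a h
            omega
      subst hab
      have hmt : ∀ x, x ∈ t ↔ x ∈ t₂ := by
        intro x
        constructor
        · intro hx
          have hax : a < x := hat x hx
          rcases List.mem_cons.mp ((hm x).mp (List.mem_cons_of_mem _ hx)) with rfl | h
          · exact absurd hax (lt_irrefl _)
          · exact h
        · intro hx
          have hax : a < x := hbt x hx
          rcases List.mem_cons.mp ((hm x).mpr (List.mem_cons_of_mem _ hx)) with rfl | h
          · exact absurd hax (lt_irrefl _)
          · exact h
      rw [ih t₂ ht ht₂ hmt]

-- ===== VERDICT (by name: the statement is the Claim_ definition above) =====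
theorem intersectionK_spec : Claim_equal_intersectionK := by
  intro arrays _ hpre
  obtain ⟨hne, hs3⟩ := hpre
  unfold Spec_intersectionK
  cases arrays with
  | nil => exact absurd rfl hne
  | cons a rest =>
    cases rest with
    | nil => simp [intersectionK, intersectionK_alt]
    | cons b rest' =>
    cases rest' with
    | nil =>
      rw [alt_eq_foldl_Intersection]
      simp [intersectionK]
    | cons c rest'' =>
      have hs : ∀ x ∈ a :: b :: c :: rest'', x.Pairwise (· ≤ ·) := by
        apply hs3; simp
      obtain ⟨_, hstrK, hmK⟩ := intersectionK_char (a :: b :: c :: rest'') (by simp) hs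
      obtain ⟨_, hstrF, hmF⟩ := foldl_char (b :: c :: rest'') a (hs a (by simp))
        (fun d hd => hs d (List.mem_cons_of_mem _ hd))
      rw [alt_eq_foldl_Intersection]
      apply strict_eq _ _ (hstrK (by simp)) (hstrF (by simp))
      intro x
      rw [hmK x, hmF x]
      constructor
      · intro h
        exact ⟨h a (by simp), fun d hd => h d (List.mem_cons_of_mem _ hd)⟩
      · intro ⟨h1, h2⟩ d hd
        rcases List.mem_cons.mp hd with rfl | hd'
        · exact h1
        · exact h2 d hd'
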